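-- pv_equiv track=rewrite | github.com/Subhankar-Rath/PS-HK13_Utkarsh_AI-DRIVEN-PATIENT-FLOW-OPTIMIZATION | backend/services/triage_llm.py | _sanitize_department
-- ===== SOURCE A (Python) =====
-- VALID_DEPARTMENTS = [
--     "Cardiology",
--     "Neurology",
--     "Orthopedics",
--     "Pediatrics",
--     "Dermatology",
--     "General",
--     "ICU",
-- ]
--
-- def _sanitize_department(value: str) -> str:
--     """Fuzzy-match the LLM's department output to a valid DB value."""
--     value = value.strip()
--     # Exact match first
--     for dept in VALID_DEPARTMENTS:
--         if dept.lower() == value.lower():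
--             return dept
--     # Partial / contains match
--     for dept in VALID_DEPARTMENTS:
--         if dept.lower() in value.lower() or value.lower() in dept.lower():
--             return dept
--     return "General"
-- ===== SOURCE B (Python) =====
-- VALID_DEPARTMENTS = [
--     "Cardiology",
--     "Neurology",
--     "Orthopedics",
--     "Pediatrics",
--     "Dermatology",
--     "General",
--     "ICU",
-- ]
--
-- def _sanitize_department(value: str) -> str:
--     """Single pass: exact match returns immediately; first partial match is
--     remembered and used only if no exact match exists anywhere."""
--     lv = value.strip().lower()
--     partial = None
--     for dept in VALID_DEPARTMENTS:
--         dl = dept.lower()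
--         if dl == lv:
--             return dept
--         if partial is None and (dl in lv or lv in dl):
--             partial = dept
--     return partial if partial is not None else "General"
-- ===== Notes on version B (the rewrite author's own statement) =====
-- stated objective: simpler
-- what changed: A's two sequential scans over VALID_DEPARTMENTS (exact pass, then partial pass) are fused into one single-pass loop that returns an exact match immediately and remembers only the first partial candidate, used after the loop if no exact match was found.
import Mathlib
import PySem

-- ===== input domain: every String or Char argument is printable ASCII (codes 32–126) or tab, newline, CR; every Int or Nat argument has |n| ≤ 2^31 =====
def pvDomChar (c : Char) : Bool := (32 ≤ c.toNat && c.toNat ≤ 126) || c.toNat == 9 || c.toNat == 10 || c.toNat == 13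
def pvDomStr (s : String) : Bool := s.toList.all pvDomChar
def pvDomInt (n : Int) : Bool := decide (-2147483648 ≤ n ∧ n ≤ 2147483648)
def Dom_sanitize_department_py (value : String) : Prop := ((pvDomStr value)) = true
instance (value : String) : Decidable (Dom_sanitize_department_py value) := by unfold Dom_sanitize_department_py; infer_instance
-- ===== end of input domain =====

-- B replaces A's two sequential scans by one single-pass loop that returns an exact
-- match immediately and remembers only the first partial match (objective: simpler).

-- ===== PORT A =====
def pvValidDepartments : List String :=
  ["Cardiology", "Neurology", "Orthopedics", "Pediatrics", "Dermatology", "General", "ICU"]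

-- first loop of A: exact (case-insensitive) match
def pvFindExact : List String → String → Option String
  | [], _ => none
  | d :: ds, v =>
    if PySem.Str.lower d == PySem.Str.lower v then some d else pvFindExact ds v

-- second loop of A: partial / contains match
def pvFindPartial : List String → String → Option String
  | [], _ => none
  | d :: ds, v =>
    if PySem.Str.isIn (PySem.Str.lower d) (PySem.Str.lower v)
        || PySem.Str.isIn (PySem.Str.lower v) (PySem.Str.lower d) then some d
    else pvFindPartial ds v

def sanitize_department_py (value : String) : String :=
  let v := PySem.Str.strip value
  match pvFindExact pvValidDepartments v with
  | some d => d
  | none =>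
    match pvFindPartial pvValidDepartments v with
    | some d => d
    | none => "General"

-- ===== PORT B =====
-- B's single loop: `p` is the remembered first partial match ("partial" variable)
def pvLoopB : List String → String → Option String → String
  | [], _, p => p.getD "General"
  | d :: ds, lv, p =>
    if PySem.Str.lower d == lv then d
    else if p.isNone
        && (PySem.Str.isIn (PySem.Str.lower d) lv || PySem.Str.isIn lv (PySem.Str.lower d)) then
      pvLoopB ds lv (some d)
    else pvLoopB ds lv p

def sanitize_department_py_alt (value : String) : String :=
  let lv := PySem.Str.lower (PySem.Str.strip value)
  pvLoopB pvValidDepartments lv none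

-- ===== PRECONDITION & SPEC =====
def Spec_sanitize_department_py (value : String) (out : String) : Prop := out = sanitize_department_py_alt value
instance (value : String) (out : String) : Decidable (Spec_sanitize_department_py value out) := by unfold Spec_sanitize_department_py; infer_instance

-- ===== CLAIM (what is proved, stated in full; the proofs are below) =====
def Claim_equal_sanitize_department_py : Prop := ∀ (value : String), Dom_sanitize_department_py value → Spec_sanitize_department_py value (sanitize_department_py value)

-- ===== LEMMAS AND PROOFS =====

-- B's one-pass loop with partial accumulator p equals A's two-pass result,
-- with p taking precedence over the partial scan.
theorem pvLoopB_eq (ds : List String) (v : String) (p : Option String) :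
    pvLoopB ds (PySem.Str.lower v) p =
      match pvFindExact ds v with
      | some d => d
      | none =>
        match p.orElse (fun _ => pvFindPartial ds v) with
        | some d => d
        | none => "General" := by
  induction ds generalizing p with
  | nil => cases p <;> simp [pvLoopB, pvFindExact, pvFindPartial, Option.orElse]
  | cons d ds ih =>
    simp only [pvLoopB, pvFindExact, pvFindPartial]
    by_cases hex : (PySem.Str.lower d == PySem.Str.lower v) = true
    · simp [hex]
    · simp only [hex, if_false, Bool.false_eq_true]
      by_cases hpar : (PySem.Str.isIn (PySem.Str.lower d) (PySem.Str.lower v)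
          || PySem.Str.isIn (PySem.Str.lower v) (PySem.Str.lower d)) = true
      · simp only [Bool.or_eq_true, PySem.Str.isIn, PySem.Str.toList_lower] at hpar
        cases p with
        | none => simp [hpar, ih, Option.orElse]
        | some x => simp [ih, Option.orElse]
      · simp only [Bool.or_eq_true, not_or, PySem.Str.isIn, PySem.Str.toList_lower] at hpar
        cases p with
        | none => simp [hpar.1, hpar.2, ih, Option.orElse]
        | some x => simp [hpar.1, hpar.2, ih, Option.orElse]

-- ===== VERDICT (by name: the statement is the Claim_ definition above) =====
theorem sanitize_department_py_spec : Claim_equal_sanitize_department_py := by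
  intro value _
  unfold Spec_sanitize_department_py sanitize_department_py sanitize_department_py_alt
  rw [pvLoopB_eq]
  cases h : pvFindExact pvValidDepartments (PySem.Str.strip value) <;>
    simp [h, Option.orElse]
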